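-- pv_equiv track=rewrite | github.com/alenjb/project_Lotto-Assistant | control_num.py | has_same_three_tens
-- ===== SOURCE A (Python) =====
-- def has_same_three_tens(lst):
--     if len(lst) < 3:
--         return False
--     tens_dict = {}  # 10의 자리 수를 키로, 출현 횟수를 값으로 하는 딕셔너리
--
--     for number in lst:
--         tens_place = number // 10  # 10의 자리 수 계산
--
--         if tens_place in tens_dict:
--             tens_dict[tens_place] += 1
--         else:
--             tens_dict[tens_place] = 1
--
--     # 딕셔너리에서 값이 3 이상인 키가 있는지 확인
--     for count in tens_dict.values():
--         if count >= 3: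
--             return True
--
--     return False
-- ===== SOURCE B (Python) =====
-- def has_same_three_tens(lst):
--     if len(lst) < 3:
--         return False
--     t = sorted(n // 10 for n in lst)
--     run = 1
--     for i in range(1, len(t)):
--         if t[i] == t[i - 1]:
--             run += 1
--             if run == 3:
--                 return True
--         else:
--             run = 1
--     return False
-- ===== Notes on version B (the rewrite author's own statement) =====
-- stated objective: alternative
-- what changed: Replaces the hash-count dictionary plus a scan over its values by sorting the tens digits once and scanning the sorted list for a run of three consecutive equal values with early exit.
import Mathlib
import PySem

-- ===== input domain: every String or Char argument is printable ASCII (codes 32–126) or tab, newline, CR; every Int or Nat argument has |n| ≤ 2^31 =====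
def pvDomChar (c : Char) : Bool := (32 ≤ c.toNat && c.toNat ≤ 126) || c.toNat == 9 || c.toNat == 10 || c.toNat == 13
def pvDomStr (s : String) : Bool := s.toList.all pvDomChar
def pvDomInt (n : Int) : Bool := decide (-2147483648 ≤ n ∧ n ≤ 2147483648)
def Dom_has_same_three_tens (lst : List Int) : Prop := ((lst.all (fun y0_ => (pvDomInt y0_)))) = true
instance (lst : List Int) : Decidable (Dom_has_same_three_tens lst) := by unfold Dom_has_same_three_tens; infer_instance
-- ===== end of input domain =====

-- B replaces A's hash-count dictionary by sort-then-scan for a run of three equal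
-- tens digits (objective: alternative algorithm, similar cost).

-- ===== PORT A =====
def has_same_three_tens (lst : List Int) : Bool :=
  if lst.length < 3 then false
  else
    -- for number in lst: count tens_place = number // 10 in tens_dict
    let tens_dict := lst.foldl (fun d number =>
      let tens_place := PySem.Int.floordiv number 10
      if d.contains tens_place then d.insert tens_place (d.getD tens_place 0 + 1)
      else d.insert tens_place 1) (PySem.Dict.empty : PySem.Dict Int Int)
    -- for count in tens_dict.values(): if count >= 3: return True / return False
    tens_dict.values.any (fun count => 3 ≤ count)

-- ===== PORT B =====
-- the run-length scan of Source B: prev = t[i-1], run = current run length (return at run == 3)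
def pvRunScan : Int → Nat → List Int → Bool
  | _, _, [] => false
  | prev, run, x :: xs =>
      if x = prev then
        (if run + 1 = 3 then true else pvRunScan x (run + 1) xs)
      else pvRunScan x 1 xs

def has_same_three_tens_alt (lst : List Int) : Bool :=
  if lst.length < 3 then false
  else
    match PySem.List.sorted (lst.map (fun n => PySem.Int.floordiv n 10)) (fun x => x) false with
    | [] => false
    | h :: t => pvRunScan h 1 t

-- ===== PRECONDITION & SPEC =====
def Spec_has_same_three_tens (lst : List Int) (out : Bool) : Prop := out = has_same_three_tens_alt lst
instance (lst : List Int) (out : Bool) : Decidable (Spec_has_same_three_tens lst out) := by unfold Spec_has_same_three_tens; infer_instance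

-- ===== CLAIM (what is proved, stated in full; the proofs are below) =====
def Claim_equal_has_same_three_tens : Prop := ∀ (lst : List Int), Dom_has_same_three_tens lst → Spec_has_same_three_tens lst (has_same_three_tens lst)

-- ===== LEMMAS AND PROOFS =====

-- A's result (past the guard) says: some tens digit occurs at least three times.
lemma pvA_char (xs : List Int) :
    ((xs.foldl (fun d t => PySem.Dict.insert d t (d.getD t 0 + 1))
        (PySem.Dict.empty : PySem.Dict Int Int)).values.any (fun c => decide (3 ≤ c))) = true
    ↔ ∃ x ∈ xs, 3 ≤ xs.count x := by
  rw [PySem.Dict.foldl_insert_getD_add_one_eq_counter,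
    PySem.Dict.values_eq_map_keys _ (PySem.Dict.nodup_keys_counter xs) 0]
  simp only [List.any_map, List.any_eq_true, Function.comp,
    PySem.Dict.getD_counter, PySem.Dict.keys_counter, PySem.Set.mem_ofList,
    decide_eq_true_eq]
  constructor
  · rintro ⟨x, hx, h3⟩; exact ⟨x, hx, by exact_mod_cast h3⟩
  · rintro ⟨x, hx, h3⟩; exact ⟨x, hx, by exact_mod_cast h3⟩

-- The run scan on a sorted list prev :: l, with current run length run (1 ≤ run ≤ 2).
lemma pvRunScan_char (l : List Int) : ∀ (prev : Int) (run : Nat),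
    (prev :: l).Pairwise (· ≤ ·) → run ≤ 2 →
    (pvRunScan prev run l = true ↔
      3 ≤ run + l.count prev ∨ ∃ y ∈ l, y ≠ prev ∧ 3 ≤ l.count y) := by
  induction l with
  | nil =>
    intro prev run _ h2
    simp [pvRunScan]; omega
  | cons x xs ih =>
    intro prev run hs h2
    by_cases hx : x = prev
    · subst hx
      by_cases h3 : run + 1 = 3
      · simp only [pvRunScan, if_pos h3]
        constructor
        · intro _; left; rw [List.count_cons_self]; omega
        · intro _; rfl
      · rw [show pvRunScan x run (x :: xs) = pvRunScan x (run + 1) xs by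
            simp [pvRunScan, h3]]
        rw [ih x (run + 1) (by
            rcases List.pairwise_cons.mp hs with ⟨_, h⟩; exact h) (by omega)]
        constructor
        · rintro (h | ⟨y, hy, hne, hc⟩)
          · left; rw [List.count_cons_self]; omega
          · right; exact ⟨y, List.mem_cons_of_mem _ hy, hne,
              by rwa [List.count_cons_of_ne hne.symm]⟩
        · rintro (h | ⟨y, hy, hne, hc⟩)
          · left; rw [List.count_cons_self] at h; omega
          · right
            rcases List.mem_cons.mp hy with rfl | hy'
            · exact absurd rfl hne
            · exact ⟨y, hy', hne, by rwa [List.count_cons_of_ne hne.symm] at hc⟩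
    · -- new value x > prev: prev never reappears in the sorted tail
      have hle : prev ≤ x := (List.pairwise_cons.mp hs).1 x (List.mem_cons_self)
      have hxs : ∀ y ∈ xs, x ≤ y :=
        (List.pairwise_cons.mp (List.pairwise_cons.mp hs).2).1
      have hprev : ∀ y ∈ x :: xs, prev < y := by
        intro y hy
        rcases List.mem_cons.mp hy with rfl | hy'
        · exact lt_of_le_of_ne hle (by simpa [eq_comm] using hx)
        · exact lt_of_lt_of_le (lt_of_le_of_ne hle (by simpa [eq_comm] using hx)) (hxs y hy')
      rw [show pvRunScan prev run (x :: xs) = pvRunScan x 1 xs by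
          simp [pvRunScan, hx]]
      rw [ih x 1 (List.pairwise_cons.mp hs).2 (by omega)]
      have hcprev : (x :: xs).count prev = 0 := by
        rw [List.count_eq_zero]
        intro h; exact absurd rfl (ne_of_gt (hprev prev h))
      constructor
      · rintro (h | ⟨y, hy, hne, hc⟩)
        · right
          exact ⟨x, List.mem_cons_self, fun h' => hx h', by
            rw [List.count_cons_self]; omega⟩
        · right
          exact ⟨y, List.mem_cons_of_mem _ hy, ne_of_gt (hprev y (List.mem_cons_of_mem _ hy)), by
            rwa [List.count_cons_of_ne hne.symm]⟩
      · rintro (h | ⟨y, hy, _, hc⟩)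
        · rw [hcprev] at h; omega
        · rcases List.mem_cons.mp hy with rfl | hy'
          · left; rw [List.count_cons_self] at hc; omega
          · by_cases hyx : y = x
            · subst hyx; left; rw [List.count_cons_self] at hc; omega
            · right; exact ⟨y, hy', hyx, by rwa [List.count_cons_of_ne (Ne.symm hyx)] at hc⟩

-- B's result (past the guard) says the same thing about the sorted list.
lemma pvB_char (xs : List Int) :
    (match PySem.List.sorted xs (fun x => x) false with
      | [] => false
      | h :: t => pvRunScan h 1 t) = true
    ↔ ∃ x ∈ xs, 3 ≤ xs.count x := by
  have hperm : (PySem.List.sorted xs (fun x => x) false).Perm xs :=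
    PySem.List.sorted_perm xs _ false
  cases hsl : PySem.List.sorted xs (fun x => x) false with
  | nil =>
    rw [hsl] at hperm
    have hx0 : xs = [] := hperm.symm.eq_nil
    subst hx0
    simp
  | cons h t =>
    have hpw : (h :: t).Pairwise (· ≤ ·) := by
      have := PySem.List.sorted_pairwise xs (fun x => x)
      rwa [hsl] at this
    rw [hsl] at hperm
    rw [pvRunScan_char t h 1 hpw (by omega)]
    constructor
    · rintro (h3 | ⟨y, hy, hne, hc⟩)
      · refine ⟨h, hperm.mem_iff.mp List.mem_cons_self, ?_⟩
        rw [← hperm.count_eq, List.count_cons_self]; omega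
      · refine ⟨y, hperm.mem_iff.mp (List.mem_cons_of_mem _ hy), ?_⟩
        rw [← hperm.count_eq, List.count_cons_of_ne hne.symm]; omega
    · rintro ⟨x, hx, hc⟩
      rw [← hperm.mem_iff] at hx
      rw [← hperm.count_eq] at hc
      rcases List.mem_cons.mp hx with rfl | hx'
      · left; rw [List.count_cons_self] at hc; omega
      · by_cases hxh : x = h
        · subst hxh; left; rw [List.count_cons_self] at hc; omega
        · right; exact ⟨x, hx', hxh, by rwa [List.count_cons_of_ne (Ne.symm hxh)] at hc⟩

-- ===== VERDICT (by name: the statement is the Claim_ definition above) =====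
theorem has_same_three_tens_spec : Claim_equal_has_same_three_tens := by
  intro lst _
  unfold Spec_has_same_three_tens has_same_three_tens has_same_three_tens_alt
  by_cases hlen : lst.length < 3
  · simp [hlen]
  · simp only [hlen, if_false]
    have hstep : (fun (d : PySem.Dict Int Int) (number : Int) =>
        if d.contains (PySem.Int.floordiv number 10) = true then
          d.insert (PySem.Int.floordiv number 10) (d.getD (PySem.Int.floordiv number 10) 0 + 1)
        else d.insert (PySem.Int.floordiv number 10) 1)
        = (fun d number => PySem.Dict.insert d (PySem.Int.floordiv number 10)
            (d.getD (PySem.Int.floordiv number 10) 0 + 1)) := by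
      funext d n
      by_cases h : d.contains (PySem.Int.floordiv n 10)
      · rw [if_pos h]
      · rw [if_neg h, PySem.Dict.getD_of_not_contains d 0 (Bool.not_eq_true _ ▸ h)]
        norm_num
    rw [Bool.eq_iff_iff, hstep]
    rw [show lst.foldl (fun d number => PySem.Dict.insert d (PySem.Int.floordiv number 10)
          (d.getD (PySem.Int.floordiv number 10) 0 + 1)) (PySem.Dict.empty : PySem.Dict Int Int)
        = (lst.map (fun n => PySem.Int.floordiv n 10)).foldl
            (fun d t => PySem.Dict.insert d t (d.getD t 0 + 1)) (PySem.Dict.empty : PySem.Dict Int Int) from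
      (List.foldl_map (f := fun n => PySem.Int.floordiv n 10)
        (g := fun d t => PySem.Dict.insert d t (d.getD t 0 + 1))).symm]
    rw [pvA_char, pvB_char]
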